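-- pv_equiv track=rewrite | github.com/wjqkkky/TTS | tts_front/grapheme_to_phoneme.py | en_ch_connect
-- ===== SOURCE A (Python) =====
-- def en_connect(connect_before: list):
--     """
--     英文连接
--     :param connect_before: 连接前英文的音标
--     :return:连接后字符串
--     """
--     count_en = 0
--     for cb in connect_before:
--         if cb.isupper():
--             count_en = count_en + 1
--
--     connect_after = ''
--     for i in range(0, len(connect_before)):
--         if count_en > 1:
--             if connect_before[i].isupper():
--                 connect_after = connect_after + connect_before[i] + ' / '
--                 count_en = count_en - 1
--             else:
--                 connect_after = connect_after + connect_before[i] + ' '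
--         else:
--             if i < len(connect_before) - 1:
--                 connect_after = connect_after + connect_before[i] + ' '
--             else:
--                 connect_after = connect_after + connect_before[i]
--     return connect_after
--
-- def en_ch_connect(phone_final: list):
--     """
--     分别连接英文和非英文,
--     :param phone_final: 中英文的音素
--     :return:
--     """
--     flag_before, flag_now = 0, 0
--     list_temp = []
--     phone_each_connet = []
--     others = []
--     for pf in phone_final:
--         if pf.isupper():
--             flag_now = 1
--         else:
--             flag_now = 2 if pf.islower() else 0  # 英文为1，中文为2，其他为0
--         if not flag_before:
--             if flag_now:
--                 flag_before = flag_now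
--                 list_temp.append(pf)
--             continue
--         if flag_now == 0:
--             others.append(pf)
--             continue
--         if flag_now == flag_before:
--             list_temp.extend(others)
--             others = []  # 其他字符添加
--             list_temp.append(pf)
--         else:
--             if flag_before == 1:  # 将英文变为字符串并添加英文
--                 temp_str = en_connect(list_temp)
--                 list_temp = others
--             else:  # 添加中文，将中文变为字符串
--                 list_temp.extend(others)
--                 temp_str = ' '.join(list_temp)
--                 list_temp = []
--             phone_each_connet.append(temp_str)
--             flag_before = flag_now
--             others = []
--             list_temp.append(pf)
--     list_temp.extend(others)
--     if flag_before == 1: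
--         temp_str = en_connect(list_temp)
--     else:
--         temp_str = ' '.join(list_temp)
--     phone_each_connet.append(temp_str)
--     phoneme = ' / '.join(phone_each_connet)
--     return phoneme
-- ===== SOURCE B (Python) =====
-- def en_ch_connect(phone_final: list):
--     """Same result as A: first pass groups tokens into (class, tokens) segments
--     (1=English/isupper, 2=Chinese/islower, 0=other, with A's 'others' migration
--     rules), second pass formats each segment and joins with ' / '."""
--
--     def _cls(s):
--         if s.isupper():
--             return 1
--         if s.islower():
--             return 2
--         return 0
--
--     def _fmt_en(toks):
--         # positions of the uppercase tokens; everything up to (and including)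
--         # the second-to-last one gets its own suffix, the rest is ' '-joined
--         ups = [i for i, t in enumerate(toks) if t.isupper()]
--         cut = ups[-2] + 1 if len(ups) >= 2 else 0
--         head = ''.join(t + (' / ' if t.isupper() else ' ') for t in toks[:cut])
--         return head + ' '.join(toks[cut:])
--
--     def _fmt(seg):
--         k, toks = seg
--         return _fmt_en(toks) if k == 1 else ' '.join(toks)
--
--     segs = []
--     cls = 0
--     cur = []
--     pend = []
--     for pf in phone_final:
--         c = _cls(pf)
--         if cls == 0:
--             if c:
--                 cls, cur = c, [pf]
--         elif c == 0:
--             pend.append(pf)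
--         elif c == cls:
--             cur += pend
--             cur.append(pf)
--             pend = []
--         elif cls == 1:
--             segs.append((1, cur))
--             cls, cur, pend = c, pend + [pf], []
--         else:
--             segs.append((2, cur + pend))
--             cls, cur, pend = c, [pf], []
--     segs.append((cls, cur + pend))
--     return ' / '.join(_fmt(s) for s in segs)
-- ===== Notes on version B (the rewrite author's own statement) =====
-- stated objective: alternative
-- what changed: B separates grouping from formatting: one pass builds explicit (class, tokens) segments with the others-migration rules, then each segment is formatted (English segments by splitting at the second-to-last uppercase token and joining the two halves, instead of A's running count_en counter interleaved with string concatenation) and the results are joined with ' / '.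
import Mathlib
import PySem

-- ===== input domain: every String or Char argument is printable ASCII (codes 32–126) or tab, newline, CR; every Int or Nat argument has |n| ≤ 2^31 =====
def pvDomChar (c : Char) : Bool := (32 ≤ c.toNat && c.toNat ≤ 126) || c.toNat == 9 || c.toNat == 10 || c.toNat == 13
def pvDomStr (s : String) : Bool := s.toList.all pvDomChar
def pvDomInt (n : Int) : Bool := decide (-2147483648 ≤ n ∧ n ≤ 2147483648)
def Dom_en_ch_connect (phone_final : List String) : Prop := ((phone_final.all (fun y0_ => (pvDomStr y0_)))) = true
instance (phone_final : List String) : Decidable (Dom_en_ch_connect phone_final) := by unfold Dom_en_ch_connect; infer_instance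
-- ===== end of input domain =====

-- B separates grouping from formatting (explicit segment list, closed-form split for the
-- English formatting) instead of A's single loop with interleaved formatting; same results.

-- Python str.isupper(): some cased character and no lowercase one (exact on the ASCII domain,
-- where the cased characters are exactly the letters).
def pvUpS (s : String) : Bool :=
  (s.toList.any (fun c => PySem.Chars.isupper c || PySem.Chars.islower c)) &&
  !(s.toList.any (fun c => PySem.Chars.islower c))

-- Python str.islower(): some cased character and no uppercase one (exact on the ASCII domain).
def pvLoS (s : String) : Bool :=
  (s.toList.any (fun c => PySem.Chars.isupper c || PySem.Chars.islower c)) &&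
  !(s.toList.any (fun c => PySem.Chars.isupper c))

-- ===== PORT A =====
-- strings are modelled as List Char throughout (PySem.Chars); the final result is wrapped by String.ofList

-- en_connect: count the uppercase tokens, then one loop over the indices
def enConnectA (connect_before : List String) : List Char :=
  ((PySem.List.pyRange 0 (PySem.List.len connect_before)).foldl
    (fun (st : List Char × Int) i =>
      if st.2 > 1 then
        if pvUpS (PySem.List.pyGetD connect_before i "") then
          (st.1 ++ (PySem.List.pyGetD connect_before i "").toList ++ " / ".toList, st.2 - 1)
        else
          (st.1 ++ (PySem.List.pyGetD connect_before i "").toList ++ " ".toList, st.2)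
      else
        if i < PySem.List.len connect_before - 1 then
          (st.1 ++ (PySem.List.pyGetD connect_before i "").toList ++ " ".toList, st.2)
        else
          (st.1 ++ (PySem.List.pyGetD connect_before i "").toList, st.2))
    ([], connect_before.foldl (fun c cb => if pvUpS cb then c + 1 else c) (0 : Int))).1

-- loop body of A: state (flag_before, list_temp, others, phone_each_connet)
def stepA (st : Nat × List String × List String × List (List Char)) (pf : String) :
    Nat × List String × List String × List (List Char) :=
  match st with
  | (fb, lt, oth, acc) =>
    let fn : Nat := if pvUpS pf then 1 else if pvLoS pf then 2 else 0
    if fb = 0 then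
      (if fn ≠ 0 then (fn, lt ++ [pf], oth, acc) else (fb, lt, oth, acc))
    else if fn = 0 then (fb, lt, oth ++ [pf], acc)
    else if fn = fb then (fb, (lt ++ oth) ++ [pf], [], acc)
    else if fb = 1 then (fn, oth ++ [pf], [], acc ++ [enConnectA lt])
    else (fn, [pf], [], acc ++ [PySem.Chars.join " ".toList ((lt ++ oth).map String.toList)])

def en_ch_connect (phone_final : List String) : String :=
  match phone_final.foldl stepA (0, [], [], []) with
  | (fb, lt, oth, acc) =>
    String.ofList (PySem.Chars.join " / ".toList
      (acc ++ [if fb = 1 then enConnectA (lt ++ oth)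
               else PySem.Chars.join " ".toList ((lt ++ oth).map String.toList)]))

-- ===== PORT B =====

-- _fmt_en: indices of the uppercase tokens; everything up to (and including) the
-- second-to-last one gets its own suffix, the rest is ' '-joined.
-- (ups[-2] is guarded by the length test, so pyGetD's default is never used.)
def fmtEnB (toks : List String) : List Char :=
  let ups : List Int :=
    ((PySem.List.enumerate toks).filter (fun p => pvUpS p.2)).map (fun p => p.1)
  let cut : Int := if 2 ≤ ups.length then PySem.List.pyGetD ups (-2) 0 + 1 else 0
  PySem.Chars.join []
      ((PySem.List.slice toks none (some cut)).map
        (fun t => t.toList ++ (if pvUpS t then " / " else " ").toList))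
    ++ PySem.Chars.join " ".toList ((PySem.List.slice toks (some cut) none).map String.toList)

-- _fmt: format one segment
def fmtSegB (seg : Nat × List String) : List Char :=
  if seg.1 = 1 then fmtEnB seg.2
  else PySem.Chars.join " ".toList (seg.2.map String.toList)

-- pass 1 loop body of B: state (segs, cls, cur, pend)
def stepB (st : List (Nat × List String) × Nat × List String × List String) (pf : String) :
    List (Nat × List String) × Nat × List String × List String :=
  match st with
  | (segs, cls, cur, pend) =>
    let c : Nat := if pvUpS pf then 1 else if pvLoS pf then 2 else 0
    if cls = 0 then
      (if c ≠ 0 then (segs, c, [pf], pend) else (segs, cls, cur, pend))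
    else if c = 0 then (segs, cls, cur, pend ++ [pf])
    else if c = cls then (segs, cls, (cur ++ pend) ++ [pf], [])
    else if cls = 1 then (segs ++ [(1, cur)], c, pend ++ [pf], [])
    else (segs ++ [(2, cur ++ pend)], c, [pf], [])

def en_ch_connect_alt (phone_final : List String) : String :=
  match phone_final.foldl stepB ([], 0, [], []) with
  | (segs, cls, cur, pend) =>
    String.ofList (PySem.Chars.join " / ".toList ((segs ++ [(cls, cur ++ pend)]).map fmtSegB))

-- ===== PRECONDITION & SPEC =====
def Spec_en_ch_connect (phone_final : List String) (out : String) : Prop := out = en_ch_connect_alt phone_final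
instance (phone_final : List String) (out : String) : Decidable (Spec_en_ch_connect phone_final out) := by unfold Spec_en_ch_connect; infer_instance

-- ===== CLAIM (what is proved, stated in full; the proofs are below) =====
def Claim_equal_en_ch_connect : Prop := ∀ (phone_final : List String), Dom_en_ch_connect phone_final → Spec_en_ch_connect phone_final (en_ch_connect phone_final)

-- ===== LEMMAS AND PROOFS =====

-- structural recast of A's en_connect loop: per-step result and remaining count
def goA : List String → Int → List Char × Int
  | [], c => ([], c)
  | x :: xs, c =>
    let pc : List Char × Int :=
      if c > 1 then
        if pvUpS x then (x.toList ++ " / ".toList, c - 1) else (x.toList ++ " ".toList, c)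
      else if xs = [] then (x.toList, c) else (x.toList ++ " ".toList, c)
    ((pc.1 ++ (goA xs pc.2).1), (goA xs pc.2).2)

-- A's loop body, index/token made explicit
def hA (n : Int) (st : List Char × Int) (p : Int × String) : List Char × Int :=
  if st.2 > 1 then
    if pvUpS p.2 then (st.1 ++ p.2.toList ++ " / ".toList, st.2 - 1)
    else (st.1 ++ p.2.toList ++ " ".toList, st.2)
  else if p.1 < n - 1 then (st.1 ++ p.2.toList ++ " ".toList, st.2)
  else (st.1 ++ p.2.toList, st.2)

lemma joinNil_cons (p : List Char) (ps : List (List Char)) :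
    PySem.Chars.join [] (p :: ps) = p ++ PySem.Chars.join [] ps := by
  cases ps with
  | nil => simp [PySem.Chars.join_singleton, PySem.Chars.join_nil]
  | cons q rest => simp [PySem.Chars.join_cons_cons]

lemma goA_low : ∀ (xs : List String) (c : Int), c ≤ 1 →
    (goA xs c).1 = PySem.Chars.join " ".toList (xs.map String.toList) := by
  intro xs
  induction xs with
  | nil => intro c _; simp [goA, PySem.Chars.join_nil]
  | cons x xs ih =>
    intro c hc
    have hnot : ¬ c > 1 := by omega
    cases xs with
    | nil => simp [goA, hnot, PySem.Chars.join_singleton]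
    | cons y rest =>
      have hstep : (goA (x :: y :: rest) c).1 = (x.toList ++ " ".toList) ++ (goA (y :: rest) c).1 := by
        simp [goA, hnot]
      rw [hstep, ih c hc]
      simp [PySem.Chars.join_cons_cons, List.append_assoc]

lemma foldA_eq_goA : ∀ (l : List String) (n : Int) (s : Nat) (acc : List Char) (c : Int),
    (s : Int) + l.length = n →
    (PySem.List.enumerate l (s : Int)).foldl (hA n) (acc, c) = (acc ++ (goA l c).1, (goA l c).2) := by
  intro l
  induction l with
  | nil => intro n s acc c _; simp [goA]
  | cons x xs ih =>
    intro n s acc c hn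
    rw [PySem.List.enumerate_cons]
    simp only [List.foldl_cons]
    have hlast : ((s : Int) < n - 1) ↔ xs ≠ [] := by
      simp only [List.length_cons] at hn
      constructor
      · intro h hxs; subst hxs; simp at hn; omega
      · intro h
        have : 0 < xs.length := List.length_pos_iff.mpr h
        omega
    have hstep : ((s : Int) + 1) = ((s + 1 : Nat) : Int) := by push_cast; ring
    have hn' : ((s + 1 : Nat) : Int) + xs.length = n := by
      simp only [List.length_cons] at hn; push_cast at hn ⊢; omega
    by_cases hc : c > 1
    · by_cases hu : pvUpS x
      · simp only [hA, hc, if_true, hu]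
        rw [hstep, ih n (s + 1) _ _ hn']
        simp [goA, hc, hu, List.append_assoc]
      · simp only [hA, hc, if_true, hu, Bool.false_eq_true, if_false]
        rw [hstep, ih n (s + 1) _ _ hn']
        simp [goA, hc, hu, List.append_assoc]
    · by_cases hxs : xs = []
      · have : ¬ ((s : Int) < n - 1) := by rw [hlast]; simp [hxs]
        simp only [hA, hc, if_false, this]
        rw [hstep, ih n (s + 1) _ _ hn']
        simp [goA, hc, hxs]
      · have : (s : Int) < n - 1 := hlast.mpr hxs
        simp only [hA, hc, if_false, this, if_true]
        rw [hstep, ih n (s + 1) _ _ hn']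
        simp [goA, hc, hxs]

lemma enConnectA_eq_goA (l : List String) :
    enConnectA l = (goA l ((l.countP pvUpS : Nat) : Int)).1 := by
  have hc : l.foldl (fun c cb => if pvUpS cb then c + 1 else c) (0 : Int) = ((l.countP pvUpS : Nat) : Int) := by
    simpa using PySem.List.foldl_count_if pvUpS l 0
  unfold enConnectA
  rw [show (fun (st : List Char × Int) (i : Int) =>
      if st.2 > 1 then
        if pvUpS (PySem.List.pyGetD l i "") then
          (st.1 ++ (PySem.List.pyGetD l i "").toList ++ " / ".toList, st.2 - 1)
        else
          (st.1 ++ (PySem.List.pyGetD l i "").toList ++ " ".toList, st.2)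
      else
        if i < PySem.List.len l - 1 then
          (st.1 ++ (PySem.List.pyGetD l i "").toList ++ " ".toList, st.2)
        else
          (st.1 ++ (PySem.List.pyGetD l i "").toList, st.2)) =
    (fun st i => hA (PySem.List.len l) st (i, PySem.List.pyGetD l i "")) from rfl]
  rw [← List.foldl_map, ← PySem.List.enumerate_eq_map_pyRange l ""]
  rw [hc]
  have h0 : PySem.List.enumerate l = PySem.List.enumerate l ((0 : Nat) : Int) := by norm_num
  rw [h0, foldA_eq_goA l (PySem.List.len l) 0 [] _ (by simp [PySem.List.len])]
  simp

-- ===== B-side characterisation =====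

-- indices (from s) of the uppercase tokens
def upsOf (l : List String) (s : Int) : List Int :=
  ((PySem.List.enumerate l s).filter (fun p => pvUpS p.2)).map (fun p => p.1)

def cutOf (l : List String) : Int :=
  if 2 ≤ (upsOf l 0).length then PySem.List.pyGetD (upsOf l 0) (-2) 0 + 1 else 0

lemma upsOf_nil (s : Int) : upsOf [] s = [] := by simp [upsOf, PySem.List.enumerate]

lemma upsOf_cons (x : String) (xs : List String) (s : Int) :
    upsOf (x :: xs) s = (if pvUpS x then [s] else []) ++ upsOf xs (s + 1) := by
  simp only [upsOf, PySem.List.enumerate_cons, List.filter_cons]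
  by_cases h : pvUpS x <;> simp [h]

lemma upsOf_shift : ∀ (l : List String) (s : Int), upsOf l s = (upsOf l 0).map (· + s) := by
  intro l
  induction l with
  | nil => intro s; simp [upsOf_nil]
  | cons x xs ih =>
    intro s
    rw [upsOf_cons, upsOf_cons]
    simp only [zero_add]
    rw [ih (s + 1), ih 1]
    simp only [List.map_append, List.map_map]
    congr 1
    · by_cases h : pvUpS x <;> simp [h]
    · apply List.map_congr_left
      intro a _
      simp; ring

lemma upsOf_length : ∀ (l : List String) (s : Int), (upsOf l s).length = l.countP pvUpS := by
  intro l
  induction l with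
  | nil => intro s; simp [upsOf_nil]
  | cons x xs ih =>
    intro s
    rw [upsOf_cons, List.countP_cons]
    by_cases h : pvUpS x <;> simp [h, ih]

lemma upsOf_bound : ∀ (l : List String) (s : Int), ∀ i ∈ upsOf l s, s ≤ i ∧ i < s + l.length := by
  intro l
  induction l with
  | nil => intro s i hi; simp [upsOf_nil] at hi
  | cons x xs ih =>
    intro s i hi
    rw [upsOf_cons] at hi
    rcases List.mem_append.mp hi with h | h
    · by_cases hu : pvUpS x
      · simp [hu] at h; subst h
        simp only [List.length_cons]
        push_cast
        omega
      · simp [hu] at h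
    · have := ih (s + 1) i h
      simp only [List.length_cons]
      push_cast
      omega

lemma pyGetD_neg_two (xs : List Int) (h : 2 ≤ xs.length) :
    PySem.List.pyGetD xs (-2) 0 = xs[xs.length - 2]'(by omega) := by
  simp only [PySem.List.pyGetD, PySem.List.pyGet?, PySem.List.pyIdx?]
  have h1 : ¬ ((0 : Int) ≤ -2) := by norm_num
  have h2 : (-(xs.length : Int)) ≤ -2 := by
    have : (2 : Int) ≤ xs.length := by exact_mod_cast h
    omega
  simp only [h1, if_false, h2, if_true]
  have h3 : (-(-2 : Int)).toNat = 2 := rfl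
  rw [h3]
  show (xs[xs.length - 2]?).getD 0 = xs[xs.length - 2]'(by omega)
  rw [List.getElem?_eq_getElem (by omega)]
  rfl

lemma cutOf_low (l : List String) (h : l.countP pvUpS ≤ 1) : cutOf l = 0 := by
  unfold cutOf
  rw [if_neg]
  rw [upsOf_length]
  omega

lemma cutOf_nonneg (l : List String) : 0 ≤ cutOf l := by
  unfold cutOf
  split
  · rename_i h
    have hm : PySem.List.pyGetD (upsOf l 0) (-2) 0 ∈ upsOf l 0 := by
      rw [pyGetD_neg_two _ h]
      exact List.getElem_mem _
    have := (upsOf_bound l 0 _ hm).1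
    omega
  · exact le_refl 0

lemma cutOf_cons (x : String) (xs : List String) (h : 2 ≤ (x :: xs).countP pvUpS) :
    cutOf (x :: xs) = cutOf xs + 1 := by
  have hul : (upsOf xs 0).length = xs.countP pvUpS := upsOf_length xs 0
  unfold cutOf
  rw [upsOf_cons x xs 0, upsOf_shift xs (0 + 1)]
  by_cases hu : pvUpS x
  · have hcc : (x :: xs).countP pvUpS = xs.countP pvUpS + 1 := by
      rw [List.countP_cons]; simp [hu]
    simp only [hu, if_true, List.singleton_append]
    by_cases h2 : 2 ≤ (upsOf xs 0).length
    · have hL : 2 ≤ ((0 : Int) :: (upsOf xs 0).map (· + (0 + 1))).length := by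
        simp; omega
      rw [if_pos hL, if_pos h2, pyGetD_neg_two _ hL, pyGetD_neg_two _ h2]
      have hidx : ((0 : Int) :: (upsOf xs 0).map (· + (0 + 1))).length - 2 =
          ((upsOf xs 0).length - 2) + 1 := by simp; omega
      simp only [hidx, List.getElem_cons_succ, List.getElem_map]
      ring
    · have h1 : (upsOf xs 0).length = 1 := by omega
      have hL : 2 ≤ ((0 : Int) :: (upsOf xs 0).map (· + (0 + 1))).length := by simp [h1]
      rw [if_pos hL, if_neg h2, pyGetD_neg_two _ hL]
      simp [h1]
  · have hcc : (x :: xs).countP pvUpS = xs.countP pvUpS := by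
      rw [List.countP_cons]; simp [hu]
    simp only [hu, Bool.false_eq_true, if_false, List.nil_append]
    have h2 : 2 ≤ (upsOf xs 0).length := by omega
    have hL : 2 ≤ ((upsOf xs 0).map (· + (0 + 1))).length := by simpa using h2
    rw [if_pos hL, if_pos h2, pyGetD_neg_two _ hL, pyGetD_neg_two _ h2]
    have hidx : ((upsOf xs 0).map (· + (0 + 1))).length - 2 = (upsOf xs 0).length - 2 := by simp
    simp only [hidx, List.getElem_map]
    ring

lemma fmtEnB_eq_cut (l : List String) :
    fmtEnB l =
      PySem.Chars.join [] ((PySem.List.slice l none (some (cutOf l))).map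
          (fun t => t.toList ++ (if pvUpS t then " / " else " ").toList))
        ++ PySem.Chars.join " ".toList ((PySem.List.slice l (some (cutOf l)) none).map String.toList) := rfl

lemma fmtEnB_def (l : List String) :
    fmtEnB l =
      PySem.Chars.join [] ((l.take (cutOf l).toNat).map
          (fun t => t.toList ++ (if pvUpS t then " / " else " ").toList))
        ++ PySem.Chars.join " ".toList ((l.drop (cutOf l).toNat).map String.toList) := by
  rw [fmtEnB_eq_cut, PySem.List.slice_to l (cutOf_nonneg l), PySem.List.slice_from l (cutOf_nonneg l)]

lemma fmtEnB_eq_goA : ∀ (l : List String), fmtEnB l = (goA l ((l.countP pvUpS : Nat) : Int)).1 := by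
  intro l
  induction l with
  | nil =>
    rw [fmtEnB_def]
    simp [goA, PySem.Chars.join_nil]
  | cons x xs ih =>
    by_cases hk : (x :: xs).countP pvUpS ≤ 1
    · rw [fmtEnB_def, cutOf_low _ hk]
      simp only [Int.toNat_zero, List.take_zero, List.drop_zero, List.map_nil,
        PySem.Chars.join_nil, List.nil_append]
      rw [goA_low _ _ (by exact_mod_cast hk)]
    · have h2 : 2 ≤ (x :: xs).countP pvUpS := by omega
      have hcut := cutOf_cons x xs h2
      have hnn := cutOf_nonneg xs
      have htn : (cutOf (x :: xs)).toNat = (cutOf xs).toNat + 1 := by omega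
      rw [fmtEnB_def, htn]
      simp only [List.take_succ_cons, List.drop_succ_cons, List.map_cons]
      rw [joinNil_cons, List.append_assoc, ← fmtEnB_def xs]
      have hk1 : (1 : Int) < ((x :: xs).countP pvUpS : Nat) := by exact_mod_cast h2
      by_cases hu : pvUpS x
      · have hc : (x :: xs).countP pvUpS = xs.countP pvUpS + 1 := by
          rw [List.countP_cons]; simp [hu]
        have hrec : (((x :: xs).countP pvUpS : Nat) : Int) - 1 = ((xs.countP pvUpS : Nat) : Int) := by
          rw [hc]; push_cast; ring
        have hstep : (goA (x :: xs) (((x :: xs).countP pvUpS : Nat) : Int)).1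
            = (x.toList ++ " / ".toList) ++ (goA xs ((xs.countP pvUpS : Nat) : Int)).1 := by
          simp only [goA]
          rw [if_pos hk1, if_pos hu, hrec]
        rw [hstep, ← ih]
        simp [hu, List.append_assoc]
      · have hc : (x :: xs).countP pvUpS = xs.countP pvUpS := by
          rw [List.countP_cons]; simp [hu]
        have h2' : 2 ≤ xs.countP pvUpS := by omega
        have hk1' : (1 : Int) < ((xs.countP pvUpS : Nat) : Int) := by exact_mod_cast h2'
        have hstep : (goA (x :: xs) (((x :: xs).countP pvUpS : Nat) : Int)).1
            = (x.toList ++ " ".toList) ++ (goA xs ((xs.countP pvUpS : Nat) : Int)).1 := by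
          rw [hc]
          simp only [goA]
          rw [if_pos hk1', if_neg (by simp [hu] : ¬ pvUpS x = true)]
        rw [hstep, ← ih]
        simp [hu, List.append_assoc]

lemma enConnectA_eq_fmtEnB (l : List String) : enConnectA l = fmtEnB l := by
  rw [enConnectA_eq_goA, fmtEnB_eq_goA]

-- ===== the two main loops compute matching states =====

def phiAB (st : List (Nat × List String) × Nat × List String × List String) :
    Nat × List String × List String × List (List Char) :=
  (st.2.1, st.2.2.1, st.2.2.2, st.1.map fmtSegB)

lemma step_comm (st : List (Nat × List String) × Nat × List String × List String) (pf : String)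
    (hinv : st.2.1 = 0 → st.2.2.1 = []) :
    stepA (phiAB st) pf = phiAB (stepB st pf) := by
  obtain ⟨segs, cls, cur, pend⟩ := st
  simp only [phiAB] at hinv ⊢
  unfold stepA stepB
  by_cases h0 : cls = 0
  · subst h0
    have hc := hinv rfl
    subst hc
    by_cases hup : pvUpS pf <;> by_cases hlo : pvLoS pf <;> simp [hup, hlo]
  · by_cases hup : pvUpS pf <;> by_cases hlo : pvLoS pf <;>
      simp only [hup, hlo] <;>
      split_ifs <;>
      simp_all [fmtSegB, enConnectA_eq_fmtEnB]

lemma stepB_inv (st : List (Nat × List String) × Nat × List String × List String) (pf : String)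
    (hinv : st.2.1 = 0 → st.2.2.1 = []) :
    (stepB st pf).2.1 = 0 → (stepB st pf).2.2.1 = [] := by
  obtain ⟨segs, cls, cur, pend⟩ := st
  simp only at hinv
  by_cases hup : pvUpS pf <;> by_cases hlo : pvLoS pf <;>
    simp only [stepB, hup, hlo] <;>
    split_ifs <;> simp_all

lemma fold_comm : ∀ (l : List String) (st : List (Nat × List String) × Nat × List String × List String),
    (st.2.1 = 0 → st.2.2.1 = []) →
    l.foldl stepA (phiAB st) = phiAB (l.foldl stepB st) := by
  intro l
  induction l with
  | nil => intro st _; rfl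
  | cons x xs ih =>
    intro st h
    simp only [List.foldl_cons]
    rw [step_comm st x h]
    exact ih _ (stepB_inv st x h)

-- ===== VERDICT (by name: the statement is the Claim_ definition above) =====
theorem en_ch_connect_spec : Claim_equal_en_ch_connect := by
  intro l _
  unfold Spec_en_ch_connect en_ch_connect en_ch_connect_alt
  rw [show ((0 : Nat), ([] : List String), ([] : List String), ([] : List (List Char))) =
      phiAB (([] : List (Nat × List String)), 0, ([] : List String), ([] : List String)) from rfl]
  rw [fold_comm l ([], 0, [], []) (fun _ => rfl)]
  rcases l.foldl stepB ([], 0, [], []) with ⟨segs, cls, cur, pend⟩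
  simp only [phiAB, List.map_append, List.map_cons, List.map_nil]
  congr 1
  congr 1
  by_cases h1 : cls = 1 <;> simp [h1, fmtSegB, enConnectA_eq_fmtEnB]
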